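-- pv_equiv track=rewrite | github.com/Gisgod8811/Giangreporistory | src/utils.py | gio_chi
-- ===== SOURCE A (Python) =====
-- def gio_chi(gio_sinh: int) -> str:
--     """Chuyển đổi giờ sinh số (0-23) sang tên Chi."""
--     chi_gio = [
--         (23, 1, "Tý"), (1, 3, "Sửu"), (3, 5, "Dần"), (5, 7, "Mão"), (7, 9, "Thìn"), (9, 11, "Tỵ"),
--         (11, 13, "Ngọ"), (13, 15, "Mùi"), (15, 17, "Thân"), (17, 19, "Dậu"), (19, 21, "Tuất"), (21, 23, "Hợi")
--     ]
--     for start, end, chi in chi_gio: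
--         if start <= gio_sinh < end or (start == 23 and (gio_sinh == 23 or gio_sinh < 1)):
--             return chi
--     return "Tý"
-- ===== SOURCE B (Python) =====
-- _CHI_NAMES = ["Tý", "Sửu", "Dần", "Mão", "Thìn", "Tỵ",
--               "Ngọ", "Mùi", "Thân", "Dậu", "Tuất", "Hợi"]
--
-- def gio_chi(gio_sinh: int) -> str:
--     """Chuyển đổi giờ sinh số (0-23) sang tên Chi."""
--     if gio_sinh < 1 or gio_sinh >= 23:
--         return "Tý"
--     return _CHI_NAMES[(gio_sinh + 1) // 2]
-- ===== Notes on version B (the rewrite author's own statement) =====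
-- stated objective: simpler
-- what changed: Replaced the linear scan over (start,end,name) interval tuples with a range guard plus direct arithmetic indexing names[(h+1)//2] into the zodiac-name list.
import Mathlib
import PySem

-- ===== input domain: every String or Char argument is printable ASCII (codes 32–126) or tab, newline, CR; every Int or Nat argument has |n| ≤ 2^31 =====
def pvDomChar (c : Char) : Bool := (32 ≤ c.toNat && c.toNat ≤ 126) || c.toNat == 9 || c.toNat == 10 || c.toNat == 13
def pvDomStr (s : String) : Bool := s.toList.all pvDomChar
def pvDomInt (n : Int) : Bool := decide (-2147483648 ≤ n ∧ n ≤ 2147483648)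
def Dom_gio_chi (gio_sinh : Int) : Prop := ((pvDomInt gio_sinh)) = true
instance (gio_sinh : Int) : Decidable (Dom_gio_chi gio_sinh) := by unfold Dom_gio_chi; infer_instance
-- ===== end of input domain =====

-- B replaces A's interval-table scan with a range guard and direct arithmetic indexing (simpler).


-- ===== PORT A =====
-- literal port of A: scan the interval table, first match wins, fall through to "Tý"
def chiGioTable : List (Int × Int × String) :=
  [(23, 1, "Tý"), (1, 3, "Sửu"), (3, 5, "Dần"), (5, 7, "Mão"), (7, 9, "Thìn"), (9, 11, "Tỵ"),
   (11, 13, "Ngọ"), (13, 15, "Mùi"), (15, 17, "Thân"), (17, 19, "Dậu"), (19, 21, "Tuất"), (21, 23, "Hợi")]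

def gioChiLoop (gio_sinh : Int) : List (Int × Int × String) → String
  | [] => "Tý"
  | (start, «end», chi) :: rest =>
      if (start ≤ gio_sinh ∧ gio_sinh < «end») ∨ (start = 23 ∧ (gio_sinh = 23 ∨ gio_sinh < 1)) then chi
      else gioChiLoop gio_sinh rest

def gio_chi (gio_sinh : Int) : String := gioChiLoop gio_sinh chiGioTable

-- ===== PORT B =====
-- range guard + direct arithmetic indexing into the name list (Source B)
def chiNames : List String :=
  ["Tý", "Sửu", "Dần", "Mão", "Thìn", "Tỵ", "Ngọ", "Mùi", "Thân", "Dậu", "Tuất", "Hợi"]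

def gio_chi_alt (gio_sinh : Int) : String :=
  if gio_sinh < 1 ∨ 23 ≤ gio_sinh then "Tý"
  else (PySem.List.pyGet? chiNames (PySem.Int.floordiv (gio_sinh + 1) 2)).getD ""

-- ===== PRECONDITION & SPEC =====
def Spec_gio_chi (gio_sinh : Int) (out : String) : Prop := out = gio_chi_alt gio_sinh
instance (gio_sinh : Int) (out : String) : Decidable (Spec_gio_chi gio_sinh out) := by unfold Spec_gio_chi; infer_instance

-- ===== CLAIM (what is proved, stated in full; the proofs are below) =====
def Claim_equal_gio_chi : Prop := ∀ (gio_sinh : Int), Dom_gio_chi gio_sinh → Spec_gio_chi gio_sinh (gio_chi gio_sinh)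

-- ===== LEMMAS AND PROOFS =====

-- ===== VERDICT (by name: the statement is the Claim_ definition above) =====
lemma loop_cons (g s e : Int) (c : String) (rest : List (Int × Int × String)) :
    gioChiLoop g ((s, e, c) :: rest) =
      if (s ≤ g ∧ g < e) ∨ (s = 23 ∧ (g = 23 ∨ g < 1)) then c else gioChiLoop g rest := rfl

theorem gio_chi_spec : Claim_equal_gio_chi := by
  intro g _
  unfold Spec_gio_chi
  by_cases h1 : 1 ≤ g ∧ g < 23
  · obtain ⟨hl, hr⟩ := h1
    interval_cases g <;> decide
  · have hb : gio_chi_alt g = "Tý" := by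
      unfold gio_chi_alt
      rw [if_pos (by omega)]
    rw [hb]
    unfold gio_chi chiGioTable
    by_cases h2 : g = 23 ∨ g < 1
    · rw [loop_cons, if_pos (Or.inr ⟨rfl, h2⟩)]
    · -- g > 23: every interval test fails, fall through to "Tý"
      repeat rw [loop_cons, if_neg (by omega)]
      rfl
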